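-- pv_equiv track=rewrite | github.com/MrBrantCode/unitest_baseline | mut_generate/mist_train_cf/cf_199/solution.py | powerset_with_duplicates
-- ===== SOURCE A (Python) =====
-- def powerset_with_duplicates(lst):
--     # Remove duplicate elements from the input list
--     lst = list(set(lst))
--
--     # Sort the input list in lexicographical order
--     lst.sort()
--
--     # Initialize the powerset with an empty set
--     powerset = [[]]
--
--     # Generate the powerset
--     for num in lst:
--         # Get the current length of the powerset
--         curr_len = len(powerset)
--
--         # Iterate over the current powerset and add the current element to each subset
--         for i in range(curr_len):
--             subset = powerset[i] + [num]
--             # Add the subset to the powerset if it's not already present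
--             if subset not in powerset:
--                 powerset.append(subset)
--
--     # Sort the powerset in lexicographical order
--     powerset.sort()
--
--     # Return the modified input list and the powerset
--     return lst, powerset
-- ===== SOURCE B (Python) =====
-- def powerset_with_duplicates(lst):
--     # Dedup and sort, then enumerate every subset by bitmask instead of
--     # iteratively extending the powerset with a quadratic membership scan.
--     lst = sorted(set(lst))
--     n = len(lst)
--     powerset = [[lst[i] for i in range(n) if (m >> i) & 1] for m in range(2 ** n)]
--     powerset.sort()
--     return lst, powerset
-- ===== Notes on version B (the rewrite author's own statement) =====
-- stated objective: alternative
-- what changed: Replaces the incremental powerset doubling with its per-append linear membership scan by direct bitmask enumeration of all subsets of the deduped sorted list; intended as faster (in one timing run A timed out at n=16 where B returned and A's re-run took 176x B's time, but another run could not measure a ratio).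
import Mathlib
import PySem

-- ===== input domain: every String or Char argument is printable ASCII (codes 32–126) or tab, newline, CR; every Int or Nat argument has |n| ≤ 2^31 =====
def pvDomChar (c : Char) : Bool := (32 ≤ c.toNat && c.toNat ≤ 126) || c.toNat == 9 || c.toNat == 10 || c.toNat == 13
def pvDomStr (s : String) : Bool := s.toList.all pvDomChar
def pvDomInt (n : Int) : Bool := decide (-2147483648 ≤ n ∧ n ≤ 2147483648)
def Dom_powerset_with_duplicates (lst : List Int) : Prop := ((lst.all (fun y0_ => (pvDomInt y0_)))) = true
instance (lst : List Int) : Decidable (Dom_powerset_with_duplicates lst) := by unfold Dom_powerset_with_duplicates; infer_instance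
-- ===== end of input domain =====

-- B enumerates the powerset by bitmask instead of A's incremental doubling with a
-- linear "not in powerset" scan before each append (intended as faster; one timing
-- run measured A at 176x B's time, another could not measure a ratio).

-- ===== PORT A =====
-- inner 'for i in range(curr_len)' loop of A
def pwdStep (ps : List (List Int)) (num : Int) : List (List Int) :=
  (PySem.List.pyRange 0 (ps.length : Int) 1).foldl
    (fun acc i =>
      let subset := PySem.List.pyGetD acc i [] ++ [num]
      if subset ∈ acc then acc else acc ++ [subset]) ps

def powerset_with_duplicates (lst : List Int) : List Int × List (List Int) :=
  let lst2 := PySem.List.sorted (PySem.Set.ofList lst) (fun x => x) false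
  let ps := lst2.foldl pwdStep [[]]
  (lst2, PySem.List.sorted ps (fun x => x) false)

-- ===== PORT B =====
-- '[lst[i] for i in range(n) if (m >> i) & 1]'
def pwdMaskSubset (lst2 : List Int) (m : Nat) : List Int :=
  ((List.range lst2.length).filter (fun i => (m >>> i) % 2 == 1)).map
    (fun (i : Nat) => PySem.List.pyGetD lst2 (i : Int) 0)

def powerset_with_duplicates_alt (lst : List Int) : List Int × List (List Int) :=
  let lst2 := PySem.List.sorted (PySem.Set.ofList lst) (fun x => x) false
  let ps := (List.range (2 ^ lst2.length)).map (pwdMaskSubset lst2)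
  (lst2, PySem.List.sorted ps (fun x => x) false)

-- ===== PRECONDITION & SPEC =====
def Spec_powerset_with_duplicates (lst : List Int) (out : List Int × List (List Int)) : Prop := out = powerset_with_duplicates_alt lst
instance (lst : List Int) (out : List Int × List (List Int)) : Decidable (Spec_powerset_with_duplicates lst out) := by unfold Spec_powerset_with_duplicates; infer_instance

-- ===== CLAIM (what is proved, stated in full; the proofs are below) =====
def Claim_equal_powerset_with_duplicates : Prop := ∀ (lst : List Int), Dom_powerset_with_duplicates lst → Spec_powerset_with_duplicates lst (powerset_with_duplicates lst)

-- ===== LEMMAS AND PROOFS =====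

-- pure doubling step both algorithms reduce to
def pwdDbl (ps : List (List Int)) (num : Int) : List (List Int) :=
  ps ++ ps.map (fun s => s ++ [num])

theorem pwdStep_aux (num : Int) (ps : List (List Int)) (hnd : ps.Nodup)
    (hfree : ∀ s ∈ ps, num ∉ s) :
    ∀ (j k : Nat), k + j = ps.length →
    ((PySem.List.pyRange (k : Int) (ps.length : Int) 1).foldl
      (fun acc i =>
        let subset := PySem.List.pyGetD acc i [] ++ [num]
        if subset ∈ acc then acc else acc ++ [subset])
      (ps ++ (ps.take k).map (fun s => s ++ [num]))) = pwdDbl ps num := by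
  intro j
  induction j with
  | zero =>
    intro k hk
    rw [PySem.List.pyRange_one_eq_nil (by omega)]
    simp [pwdDbl, List.take_of_length_le (by omega : ps.length ≤ k)]
  | succ j ih =>
    intro k hk
    have hklen : k < ps.length := by omega
    rw [PySem.List.pyRange_one_cons (by exact_mod_cast hklen)]
    simp only [List.foldl_cons]
    have hacc : PySem.List.pyGetD (ps ++ (ps.take k).map (fun s => s ++ [num])) (k : Int) [] = ps[k] := by
      rw [PySem.List.pyGetD_natCast, List.getD_eq_getElem _ _ (by simp; omega)]
      exact List.getElem_append_left _
    have hnotmem : ps[k] ++ [num] ∉ ps ++ (ps.take k).map (fun s => s ++ [num]) := by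
      intro hmem
      rcases List.mem_append.1 hmem with h | h
      · exact hfree _ h (by simp)
      · rcases List.mem_map.1 h with ⟨t, ht, hteq⟩
        have hteq' : t = ps[k] := List.append_cancel_right hteq
        have hdrop : ps[k] ∈ ps.drop k := by
          rw [List.drop_eq_getElem_cons hklen]; exact List.mem_cons_self
        have hdisj := hnd
        rw [← List.take_append_drop k ps, List.nodup_append] at hdisj
        exact hdisj.2.2 t ht ps[k] hdrop hteq'
    rw [hacc]
    simp only [if_neg hnotmem]
    have hstep : (ps ++ (ps.take k).map (fun s => s ++ [num])) ++ [ps[k] ++ [num]]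
        = ps ++ (ps.take (k+1)).map (fun s => s ++ [num]) := by
      have htk : List.take (k+1) (ps.map (fun s => s ++ [num]))
          = List.take k (ps.map (fun s => s ++ [num])) ++ [ps[k] ++ [num]] := by
        rw [List.take_add_one]
        simp [hklen]
      rw [List.map_take, List.map_take, htk, ← List.append_assoc]
    rw [hstep]
    have : ((k : Int) + 1) = ((k + 1 : Nat) : Int) := by push_cast; ring
    rw [this]
    exact ih (k + 1) (by omega)

theorem pwdStep_eq (ps : List (List Int)) (num : Int) (hnd : ps.Nodup)
    (hfree : ∀ s ∈ ps, num ∉ s) : pwdStep ps num = pwdDbl ps num := by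
  have := pwdStep_aux num ps hnd hfree ps.length 0 (by omega)
  simpa [pwdStep] using this

theorem foldl_pwdStep_eq_dbl : ∀ (l : List Int) (ps : List (List Int)), l.Nodup → ps.Nodup →
    (∀ s ∈ ps, ∀ x ∈ s, x ∉ l) → l.foldl pwdStep ps = l.foldl pwdDbl ps := by
  intro l
  induction l with
  | nil => intro ps _ _ _; rfl
  | cons num tl ih =>
    intro ps hl hnd hinv
    have hfree : ∀ s ∈ ps, num ∉ s := fun s hs hn =>
      hinv s hs num hn (by simp)
    simp only [List.foldl_cons, pwdStep_eq ps num hnd hfree]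
    apply ih _ (List.nodup_cons.1 hl).2
    · -- pwdDbl ps num is Nodup
      unfold pwdDbl
      rw [List.nodup_append]
      refine ⟨hnd, ?_, ?_⟩
      · exact hnd.map_on (fun a _ b _ h => List.append_cancel_right h)
      · intro a ha b hb
        rcases List.mem_map.1 hb with ⟨t, _, rfl⟩
        intro heq
        exact hfree _ ha (heq ▸ (by simp))
    · -- invariant for the tail
      intro s hs x hx hxtl
      unfold pwdDbl at hs
      rcases List.mem_append.1 hs with h | h
      · exact hinv s h x hx (by simp [hxtl])
      · rcases List.mem_map.1 h with ⟨t, ht, rfl⟩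
        rcases List.mem_append.1 hx with h' | h'
        · exact hinv t ht x h' (by simp [hxtl])
        · have : x = num := by simpa using h'
          subst this
          exact (List.nodup_cons.1 hl).1 hxtl

-- bit arithmetic for the bitmask split
theorem pwd_bit_low (n i m : Nat) (hi : i < n) :
    ((2 ^ n + m) >>> i) % 2 = (m >>> i) % 2 := by
  have h2 : 2 ^ n = 2 ^ i * 2 ^ (n - i) := by
    rw [← pow_add]; congr 1; omega
  rw [Nat.shiftRight_eq_div_pow, Nat.shiftRight_eq_div_pow, h2,
    Nat.mul_add_div (Nat.pow_pos (by norm_num))]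
  have : 2 ^ (n - i) = 2 * 2 ^ (n - i - 1) := by
    rw [← pow_succ']; congr 1; omega
  omega

theorem pwdMaskSubset_low (l : List Int) (x : Int) (m : Nat) (hm : m < 2 ^ l.length) :
    pwdMaskSubset (l ++ [x]) m = pwdMaskSubset l m := by
  unfold pwdMaskSubset
  rw [List.length_append, List.length_singleton, List.range_succ, List.filter_append]
  have hbit : (m >>> l.length) % 2 = 0 := by
    rw [Nat.shiftRight_eq_div_pow, Nat.div_eq_of_lt hm]
  have : List.filter (fun i => (m >>> i) % 2 == 1) [l.length] = [] := by
    simp [hbit]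
  rw [this, List.append_nil]
  apply List.map_congr_left
  intro i hi
  have hilen : i < l.length := by
    have := List.mem_filter.1 hi
    simpa using List.mem_range.1 this.1
  rw [PySem.List.pyGetD_natCast, PySem.List.pyGetD_natCast,
    List.getD_eq_getElem _ _ (by simp; omega), List.getD_eq_getElem _ _ hilen]
  exact List.getElem_append_left _

theorem pwdMaskSubset_high (l : List Int) (x : Int) (m : Nat) (hm : m < 2 ^ l.length) :
    pwdMaskSubset (l ++ [x]) (2 ^ l.length + m) = pwdMaskSubset l m ++ [x] := by
  unfold pwdMaskSubset
  rw [List.length_append, List.length_singleton, List.range_succ, List.filter_append]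
  have hbit : ((2 ^ l.length + m) >>> l.length) % 2 = 1 := by
    rw [Nat.shiftRight_eq_div_pow, Nat.add_div_left _ (Nat.pow_pos (by norm_num)),
      Nat.div_eq_of_lt hm]
  have hlast : List.filter (fun i => ((2 ^ l.length + m) >>> i) % 2 == 1) [l.length] = [l.length] := by
    simp [hbit]
  have hfilter : List.filter (fun i => ((2 ^ l.length + m) >>> i) % 2 == 1) (List.range l.length)
      = List.filter (fun i => (m >>> i) % 2 == 1) (List.range l.length) := by
    apply List.filter_congr
    intro i hi
    rw [pwd_bit_low _ _ _ (List.mem_range.1 hi)]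
  rw [hlast, hfilter, List.map_append]
  congr 1
  · apply List.map_congr_left
    intro i hi
    have hilen : i < l.length := by
      have := List.mem_filter.1 hi
      simpa using List.mem_range.1 this.1
    rw [PySem.List.pyGetD_natCast, PySem.List.pyGetD_natCast,
      List.getD_eq_getElem _ _ (by simp; omega), List.getD_eq_getElem _ _ hilen]
    exact List.getElem_append_left _
  · simp [PySem.List.pyGetD_natCast]

def pwdMaskSubsets (l : List Int) : List (List Int) :=
  (List.range (2 ^ l.length)).map (pwdMaskSubset l)

theorem pwdMaskSubsets_snoc (l : List Int) (x : Int) :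
    pwdMaskSubsets (l ++ [x]) = pwdDbl (pwdMaskSubsets l) x := by
  unfold pwdMaskSubsets pwdDbl
  rw [List.length_append, List.length_singleton, pow_succ, Nat.mul_two, List.range_add,
    List.map_append, List.map_map, List.map_map]
  congr 1
  · apply List.map_congr_left
    intro m hm
    exact pwdMaskSubset_low l x m (List.mem_range.1 hm)
  · apply List.map_congr_left
    intro m hm
    exact pwdMaskSubset_high l x m (List.mem_range.1 hm)

theorem pwdMaskSubsets_eq_foldl (l : List Int) :
    pwdMaskSubsets l = l.foldl pwdDbl [[]] := by
  induction l using List.reverseRecOn with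
  | nil => rfl
  | append_singleton l x ih =>
    rw [pwdMaskSubsets_snoc, ih, List.foldl_append]
    rfl

-- ===== VERDICT (by name: the statement is the Claim_ definition above) =====
theorem powerset_with_duplicates_spec : Claim_equal_powerset_with_duplicates := by
  unfold Claim_equal_powerset_with_duplicates
  intro lst _
  unfold Spec_powerset_with_duplicates powerset_with_duplicates powerset_with_duplicates_alt
  have hnd : (PySem.List.sorted (PySem.Set.ofList lst) (fun x => x) false).Nodup :=
    (PySem.List.sorted_ofList_pairwise_lt lst).imp ne_of_lt
  have h : (PySem.List.sorted (PySem.Set.ofList lst) (fun x => x) false).foldl pwdStep [[]]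
      = pwdMaskSubsets (PySem.List.sorted (PySem.Set.ofList lst) (fun x => x) false) := by
    rw [pwdMaskSubsets_eq_foldl]
    exact foldl_pwdStep_eq_dbl _ [[]] hnd (by simp) (by simp)
  simp only [pwdMaskSubsets] at h
  simp [h]
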